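-- pv_equiv track=rewrite | github.com/jamesdu0504/knapy | knapy.py | isSuperIncreasingKnapsack
-- ===== SOURCE A (Python) =====
-- def isSuperIncreasingKnapsack(knapsack):
-- 	sum = 0
-- 	test = True
-- 	for element in knapsack:
-- 		if element <= sum:
-- 			test = False
-- 			break
-- 		sum += element
-- 	return test
-- ===== SOURCE B (Python) =====
-- def isSuperIncreasingKnapsack(knapsack):
--     ks = list(knapsack)
--     prefix = [0]
--     s = 0
--     for e in ks:
--         s += e
--         prefix.append(s)
--     return all(e > p for e, p in zip(ks, prefix))
-- ===== Notes on version B (the rewrite author's own statement) =====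
-- stated objective: alternative
-- what changed: B materializes the full prefix-sum table in one pass and then checks every element against the sum of everything before it with a separate zip/all pass, instead of A's single loop interleaving accumulation with an early-break test.
import Mathlib
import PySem

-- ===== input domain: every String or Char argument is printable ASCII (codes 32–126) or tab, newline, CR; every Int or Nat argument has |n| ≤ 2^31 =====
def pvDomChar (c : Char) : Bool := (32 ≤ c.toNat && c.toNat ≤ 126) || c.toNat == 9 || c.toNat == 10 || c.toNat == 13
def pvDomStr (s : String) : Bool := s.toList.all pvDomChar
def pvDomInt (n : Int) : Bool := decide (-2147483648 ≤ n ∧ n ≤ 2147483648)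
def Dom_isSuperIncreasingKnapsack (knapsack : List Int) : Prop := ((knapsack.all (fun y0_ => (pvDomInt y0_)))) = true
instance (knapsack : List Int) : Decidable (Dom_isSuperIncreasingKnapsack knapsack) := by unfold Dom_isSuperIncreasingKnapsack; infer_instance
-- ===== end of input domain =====

-- B builds the full prefix-sum table in one pass, then checks each element against
-- the sum of everything before it with a separate zip/all pass (alternative decomposition).


-- ===== PORT A =====
-- A: single loop keeping a running sum, breaking (test := false) on the first
-- element ≤ the running sum. The break is modelled by stopping the recursion.
def isSuperIncreasingKnapsackGo (knapsack : List Int) (sum : Int) : Bool :=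
  match knapsack with
  | [] => true
  | element :: rest =>
      if element ≤ sum then false
      else isSuperIncreasingKnapsackGo rest (sum + element)

def isSuperIncreasingKnapsack (knapsack : List Int) : Bool :=
  isSuperIncreasingKnapsackGo knapsack 0

-- ===== PORT B =====
-- first pass of Source B: build the prefix-sum table [0, e1, e1+e2, …]
def prefixTail (ks : List Int) (s : Int) : List Int :=
  match ks with
  | [] => []
  | e :: rest => (s + e) :: prefixTail rest (s + e)

def isSuperIncreasingKnapsack_alt (knapsack : List Int) : Bool :=
  let pre := 0 :: prefixTail knapsack 0
  (knapsack.zip pre).all (fun ep => ep.2 < ep.1)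

-- ===== PRECONDITION & SPEC =====
def Spec_isSuperIncreasingKnapsack (knapsack : List Int) (out : Bool) : Prop := out = isSuperIncreasingKnapsack_alt knapsack
instance (knapsack : List Int) (out : Bool) : Decidable (Spec_isSuperIncreasingKnapsack knapsack out) := by unfold Spec_isSuperIncreasingKnapsack; infer_instance

-- ===== CLAIM (what is proved, stated in full; the proofs are below) =====
def Claim_equal_isSuperIncreasingKnapsack : Prop := ∀ (knapsack : List Int), Dom_isSuperIncreasingKnapsack knapsack → Spec_isSuperIncreasingKnapsack knapsack (isSuperIncreasingKnapsack knapsack)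

-- ===== LEMMAS AND PROOFS =====
lemma go_eq_zip_all (ks : List Int) (s : Int) :
    isSuperIncreasingKnapsackGo ks s
      = (ks.zip (s :: prefixTail ks s)).all (fun ep => ep.2 < ep.1) := by
  induction ks generalizing s with
  | nil => rfl
  | cons e rest ih =>
      simp only [isSuperIncreasingKnapsackGo, prefixTail, List.zip_cons_cons, List.all_cons]
      by_cases h : e ≤ s
      · simp [h, not_lt.mpr h]
      · simp [h, not_le.mp h, ih]

-- ===== VERDICT (by name: the statement is the Claim_ definition above) =====
theorem isSuperIncreasingKnapsack_spec : Claim_equal_isSuperIncreasingKnapsack := by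
  intro ks _
  unfold Spec_isSuperIncreasingKnapsack isSuperIncreasingKnapsack isSuperIncreasingKnapsack_alt
  exact go_eq_zip_all ks 0
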